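-- pv_equiv track=rewrite | github.com/wilmurillo-ai/Design-Assistant | .skills/openclaw-skills/skills/indivisible2025/reminiscence/scripts/search.py | query_expand_long_first
-- ===== SOURCE A (Python) =====
-- def query_expand_long_first(tokens):
--     """
--     A. 长词优先匹配：query bigram 扩展，同时按长度降序排列，
--     优先匹配最长词（4-6字），减少单字噪声。
--     """
--     expanded = list(tokens)
--     for i in range(len(tokens) - 1):
--         bigram = tokens[i] + tokens[i + 1]
--         if len(bigram) >= 3:
--             expanded.append(bigram)
--
--     # 按长度降序排列（最长在前）
--     expanded.sort(key=lambda t: -len(t))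
--     return expanded
-- ===== SOURCE B (Python) =====
-- def query_expand_long_first(tokens):
--     # Pair adjacent tokens with zip (no index arithmetic), keep long bigrams,
--     # then emit by descending-length buckets instead of comparison-sorting the list.
--     bigrams = [a + b for a, b in zip(tokens, tokens[1:]) if len(a + b) >= 3]
--     expanded = list(tokens) + bigrams
--     lengths = sorted({len(t) for t in expanded}, reverse=True)
--     return [t for L in lengths for t in expanded if len(t) == L]
-- ===== Notes on version B (the rewrite author's own statement) =====
-- stated objective: alternative
-- what changed: B builds bigrams by zipping adjacent tokens instead of indexing a range, and replaces the comparison sort of the token list by length buckets: sort only the distinct lengths descending and emit each length group in build order, which reproduces the stable descending-length order.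
import Mathlib
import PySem

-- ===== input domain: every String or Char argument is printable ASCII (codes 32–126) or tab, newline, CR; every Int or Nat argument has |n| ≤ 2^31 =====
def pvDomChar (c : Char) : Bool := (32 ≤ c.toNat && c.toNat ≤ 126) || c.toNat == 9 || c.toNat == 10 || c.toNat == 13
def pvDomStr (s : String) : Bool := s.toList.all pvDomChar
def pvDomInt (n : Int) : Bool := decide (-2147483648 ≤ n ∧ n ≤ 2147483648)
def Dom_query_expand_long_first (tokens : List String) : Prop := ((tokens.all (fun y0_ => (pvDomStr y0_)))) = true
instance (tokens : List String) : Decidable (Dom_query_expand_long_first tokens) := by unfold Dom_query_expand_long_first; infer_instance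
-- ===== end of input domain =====

-- B zips adjacent tokens instead of indexing a range, and replaces the comparison sort
-- of the token list by descending-length buckets (sort only the distinct lengths).

-- ===== PORT A =====
def query_expand_long_first (tokens : List String) : List String :=
  let expanded := (PySem.List.pyRange 0 ((tokens.length : Int) - 1) 1).foldl
    (fun acc i =>
      let bigram := PySem.List.pyGetD tokens i "" ++ PySem.List.pyGetD tokens (i + 1) ""
      if 3 ≤ PySem.Str.len bigram then acc ++ [bigram] else acc) tokens
  PySem.List.sorted expanded (fun t => -(PySem.Str.len t)) false

-- ===== PORT B =====
def query_expand_long_first_alt (tokens : List String) : List String :=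
  let bigrams := (tokens.zip tokens.tail).filterMap
    (fun p => if 3 ≤ PySem.Str.len (p.1 ++ p.2) then some (p.1 ++ p.2) else none)
  let expanded := tokens ++ bigrams
  let lengths := PySem.List.sorted (PySem.Set.ofList (expanded.map (fun t => PySem.Str.len t))) (fun x => x) true
  lengths.flatMap (fun L => expanded.filter (fun t => PySem.Str.len t == L))

-- ===== PRECONDITION & SPEC =====
def Spec_query_expand_long_first (tokens : List String) (out : List String) : Prop := out = query_expand_long_first_alt tokens
instance (tokens : List String) (out : List String) : Decidable (Spec_query_expand_long_first tokens out) := by unfold Spec_query_expand_long_first; infer_instance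

-- ===== CLAIM (what is proved, stated in full; the proofs are below) =====
def Claim_equal_query_expand_long_first : Prop := ∀ (tokens : List String), Dom_query_expand_long_first tokens → Spec_query_expand_long_first tokens (query_expand_long_first tokens)

-- ===== LEMMAS AND PROOFS =====

-- A's index loop produces exactly the adjacent pairs B gets from zip.
theorem pv_pairs_eq (tokens : List String) :
    (PySem.List.pyRange 0 ((tokens.length : Int) - 1) 1).map
      (fun i => (PySem.List.pyGetD tokens i "", PySem.List.pyGetD tokens (i + 1) ""))
      = tokens.zip tokens.tail := by
  apply List.ext_getElem
  · simp
  · intro i h1 h2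
    simp only [List.getElem_map, List.getElem_zip, List.getElem_tail]
    have hlen : i < tokens.length - 1 := by simpa using h2
    rw [PySem.List.getElem_pyRange_one]
    have e1 : (0 : Int) + (i : Int) = ((i : Nat) : Int) := by omega
    rw [e1]
    have hg1 : PySem.List.pyGetD tokens ((i : Nat) : Int) "" = tokens[i] := by
      rw [PySem.List.pyGetD_natCast]; exact List.getD_eq_getElem _ _ (by omega)
    have hg2 : PySem.List.pyGetD tokens (((i : Nat) : Int) + 1) "" = tokens[i + 1] := by
      rw [show ((i : Nat) : Int) + 1 = (((i + 1 : Nat)) : Int) by push_cast; ring,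
        PySem.List.pyGetD_natCast]
      exact List.getD_eq_getElem _ _ (by omega)
    rw [hg1, hg2]

-- 'if p(x): out.append(f(x))' over a list, Prop test, as a filterMap.
theorem pv_foldl_append_ite_filterMap {α β : Type} (q : α → Prop) [DecidablePred q]
    (f : α → β) (l : List α) (acc : List β) :
    l.foldl (fun acc x => if q x then acc ++ [f x] else acc) acc
      = acc ++ l.filterMap (fun x => if q x then some (f x) else none) := by
  induction l generalizing acc with
  | nil => simp
  | cons x l ih =>
      by_cases h : q x <;> simp [h, ih]

theorem pv_insertBy_forall_before {α : Type} (before : α → α → Bool) (x : α) (ys : List α)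
    (h : ∀ y ∈ ys, before x y = true) : PySem.List.insertBy before x ys = x :: ys := by
  cases ys with
  | nil => simp [PySem.List.insertBy]
  | cons y ys => simp [PySem.List.insertBy, h y (by simp)]

theorem pv_insertBy_append_not_before {α : Type} (before : α → α → Bool) (x : α)
    (ys zs : List α) (h : ∀ y ∈ ys, before x y = false) :
    PySem.List.insertBy before x (ys ++ zs) = ys ++ PySem.List.insertBy before x zs := by
  induction ys with
  | nil => simp
  | cons y ys ih =>
      simp only [List.cons_append, PySem.List.insertBy, h y (by simp)]
      simp [ih (fun y hy => h y (by simp [hy]))]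

theorem pv_insert_flatMap_mem (key : String → Int) (before : String → String → Bool)
    (hbef : ∀ a b, before a b = decide (key b < key a))
    (D : List Int) (hD : D.Pairwise (· > ·)) (f : Int → List String)
    (hf : ∀ L ∈ D, ∀ t ∈ f L, key t = L) (x : String) (hkD : key x ∈ D) :
    PySem.List.insertBy before x (D.flatMap f)
      = D.flatMap (fun L => f L ++ if L == key x then [x] else []) := by
  induction D with
  | nil => simp at hkD
  | cons L D' ih =>
      have hDgt : ∀ L' ∈ D', L' < L := fun L' h => (List.pairwise_cons.mp hD).1 L' h
      have hD' : D'.Pairwise (· > ·) := (List.pairwise_cons.mp hD).2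
      rcases List.mem_cons.mp hkD with hk | hk
      · -- key x = L : skip bucket f L, insert at front of the rest
        have hskip : ∀ y ∈ f L, before x y = false := by
          intro y hy
          have : key y = L := hf L (by simp) y hy
          simp [hbef, this, hk]
        have hrest : ∀ y ∈ D'.flatMap f, before x y = true := by
          intro y hy
          rcases List.mem_flatMap.mp hy with ⟨L', hL', hyL'⟩
          have : key y = L' := hf L' (by simp [hL']) y hyL'
          simp [hbef, this, hk]
          exact hDgt L' hL'
        have hne : ∀ L' ∈ D', (L' == key x) = false := by
          intro L' hL'
          have := hDgt L' hL'
          simp [hk]; omega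
        have hcg : D'.flatMap (fun L => f L ++ if L == key x then [x] else []) = D'.flatMap f := by
          apply List.flatMap_congr
          intro L' hL'
          simp [hne L' hL']
        rw [List.flatMap_cons, pv_insertBy_append_not_before _ _ _ _ hskip,
          pv_insertBy_forall_before _ _ _ hrest, List.flatMap_cons, hcg]
        simp [hk]
      · -- key x ∈ D' : skip bucket f L, recurse
        have hLk : L ≠ key x := by
          have := hDgt (key x) hk
          omega
        have hskip : ∀ y ∈ f L, before x y = false := by
          intro y hy
          have hky : key y = L := hf L (by simp) y hy
          have := hDgt (key x) hk
          simp [hbef, hky]; omega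
        rw [List.flatMap_cons, pv_insertBy_append_not_before _ _ _ _ hskip,
          ih hD' (fun L' h t ht => hf L' (by simp [h]) t ht) hk]
        simp [List.flatMap_cons, hLk]

theorem pv_insert_flatMap_not_mem (key : String → Int) (before : String → String → Bool)
    (hbef : ∀ a b, before a b = decide (key b < key a))
    (D : List Int) (hD : D.Pairwise (· > ·)) (f : Int → List String)
    (hf : ∀ L ∈ D, ∀ t ∈ f L, key t = L) (x : String) (hkD : key x ∉ D)
    (hfk : f (key x) = []) :
    PySem.List.insertBy before x (D.flatMap f)
      = (PySem.List.insertBy (fun a b => decide (b < a)) (key x) D).flatMap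
          (fun L => f L ++ if L == key x then [x] else []) := by
  induction D with
  | nil => simp [PySem.List.insertBy, hfk]
  | cons L D' ih =>
      have hDgt : ∀ L' ∈ D', L' < L := fun L' h => (List.pairwise_cons.mp hD).1 L' h
      have hD' : D'.Pairwise (· > ·) := (List.pairwise_cons.mp hD).2
      have hLk : L ≠ key x := fun h => hkD (by simp [h])
      have hkD' : key x ∉ D' := fun h => hkD (by simp [h])
      by_cases hlt : L < key x
      · -- key x goes in front; everything in the flatMap has key ≤ L < key x
        have hall : ∀ y ∈ (L :: D').flatMap f, before x y = true := by
          intro y hy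
          rcases List.mem_flatMap.mp hy with ⟨L', hL', hyL'⟩
          have hky : key y = L' := hf L' hL' y hyL'
          rcases List.mem_cons.mp hL' with h | h
          · simp [hbef, hky, h]; omega
          · have := hDgt L' h
            simp [hbef, hky]; omega
        have hins : PySem.List.insertBy (fun a b => decide (b < a)) (key x) (L :: D')
            = key x :: L :: D' := by
          simp [PySem.List.insertBy, hlt]
        have hcongr : (L :: D').flatMap (fun L => f L ++ if L == key x then [x] else [])
            = (L :: D').flatMap f := by
          apply List.flatMap_congr
          intro L' hL'
          rcases List.mem_cons.mp hL' with h | h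
          · simp [h, hLk]
          · have h1 := hDgt L' h
            have : L' ≠ key x := fun hc => hkD' (hc ▸ h)
            simp [this]
        rw [pv_insertBy_forall_before _ _ _ hall, hins]
        conv_rhs => rw [List.flatMap_cons, hcongr]
        simp [hfk]
      · -- key x < L : skip bucket f L, recurse
        have hklt : key x < L := by
          rcases lt_trichotomy (key x) L with h | h | h
          · exact h
          · exact absurd h.symm hLk
          · exact absurd h hlt
        have hskip : ∀ y ∈ f L, before x y = false := by
          intro y hy
          have hky : key y = L := hf L (by simp) y hy
          simp [hbef, hky]; omega
        have hinsL : PySem.List.insertBy (fun a b => decide (b < a)) (key x) (L :: D')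
            = L :: PySem.List.insertBy (fun a b => decide (b < a)) (key x) D' := by
          simp [PySem.List.insertBy]
          omega
        rw [List.flatMap_cons, pv_insertBy_append_not_before _ _ _ _ hskip,
          ih hD' (fun L' h t ht => hf L' (by simp [h]) t ht) hkD', hinsL]
        simp [List.flatMap_cons, hLk]

-- stable sort by descending length = descending distinct lengths, groups in build order
theorem pv_sorted_eq_buckets (key : String → Int) (xs : List String) :
    PySem.List.sorted xs (fun t => -(key t)) false
      = (PySem.List.sorted (PySem.Set.ofList (xs.map key)) (fun y => y) true).flatMap
          (fun L => xs.filter (fun t => key t == L)) := by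
  induction xs using List.reverseRecOn with
  | nil => simp [PySem.List.sorted, PySem.Set.ofList]
  | append_singleton xs x ih =>
      set D := PySem.List.sorted (PySem.Set.ofList (xs.map key)) (fun y => y) true with hDdef
      have hdd : (PySem.Set.ofList (xs.map key) : List Int) = PySem.List.dedup (xs.map key) :=
        (PySem.List.dedup_eq_ofList (xs.map key)).symm
      have hDperm : D.Perm (PySem.List.dedup (xs.map key)) := by
        rw [hDdef, hdd]; exact PySem.List.sorted_perm _ _ _
      have hDnodup : D.Nodup := hDperm.symm.nodup (PySem.List.nodup_dedup (xs.map key))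
      have hDle : D.Pairwise (fun a b => b ≤ a) := by
        have := PySem.List.sorted_pairwise_rev (PySem.Set.ofList (xs.map key)) (fun y : Int => y)
        simpa [hDdef] using this
      have hD : D.Pairwise (· > ·) := by
        refine (hDle.and hDnodup).imp ?_
        rintro a b ⟨h1, h2⟩
        exact lt_of_le_of_ne h1 (Ne.symm h2)
      have hmemD : ∀ L : Int, L ∈ D ↔ L ∈ xs.map key := by
        intro L
        rw [hDdef, hdd, PySem.List.mem_sorted, PySem.List.mem_dedup]
      have hf : ∀ L ∈ D, ∀ t ∈ xs.filter (fun t => key t == L), key t = L := by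
        intro L _ t ht
        have := List.of_mem_filter ht
        simpa using this
      have hbef : ∀ a b : String,
          (decide ((fun t => -(key t)) a < (fun t => -(key t)) b)) = decide (key b < key a) := by
        intro a b; simp
      have hfilter : ∀ L : Int, (xs ++ [x]).filter (fun t => key t == L)
          = xs.filter (fun t => key t == L) ++ if L == key x then [x] else [] := by
        intro L
        rw [List.filter_append]
        congr 1
        by_cases h : key x = L
        · subst h; simp
        · simp [h, Ne.symm h]
      have hsortapp : PySem.List.sorted (xs ++ [x]) (fun t => -(key t)) false
          = PySem.List.insertBy (fun a b => decide (-(key a) < -(key b))) x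
              (PySem.List.sorted xs (fun t => -(key t)) false) := by
        simp [PySem.List.sorted, List.foldl_append]
      rw [hsortapp, ih]
      by_cases hk : key x ∈ xs.map key
      · -- length already present: key list unchanged, token appended to its bucket
        have hdedup : PySem.Set.ofList (xs.map key ++ [key x]) = PySem.Set.ofList (xs.map key) := by
          rw [PySem.Set.ofList_append_singleton]
          simp [PySem.Set.add, hk]
        have hkD : key x ∈ D := (hmemD _).mpr hk
        rw [pv_insert_flatMap_mem key _ hbef D hD _ hf x hkD]
        rw [List.map_append, List.map_singleton, hdedup, ← hDdef]
        apply List.flatMap_congr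
        intro L hL
        rw [hfilter L]
      · -- new length: it is inserted into the descending key list
        have hdedup : PySem.Set.ofList (xs.map key ++ [key x])
            = PySem.Set.ofList (xs.map key) ++ [key x] := by
          rw [PySem.Set.ofList_append_singleton]
          simp [PySem.Set.add, hk]
        have hkD : key x ∉ D := fun h => hk ((hmemD _).mp h)
        have hfk : xs.filter (fun t => key t == key x) = [] := by
          apply List.filter_eq_nil_iff.mpr
          intro t ht hkt
          exact hk (List.mem_map.mpr ⟨t, ht, (by simpa using hkt)⟩)
        rw [pv_insert_flatMap_not_mem key _ hbef D hD _ hf x hkD hfk]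
        have hsortapp2 : PySem.List.sorted (PySem.Set.ofList (xs.map key) ++ [key x]) (fun y : Int => y) true
            = PySem.List.insertBy (fun a b : Int => decide (b < a)) (key x)
                (PySem.List.sorted (PySem.Set.ofList (xs.map key)) (fun y : Int => y) true) := by
          simp [PySem.List.sorted, List.foldl_append]
        rw [List.map_append, List.map_singleton, hdedup, hsortapp2, ← hDdef]
        apply List.flatMap_congr
        intro L hL
        rw [hfilter L]

-- ===== VERDICT (by name: the statement is the Claim_ definition above) =====
theorem query_expand_long_first_spec : Claim_equal_query_expand_long_first := by
  intro tokens _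
  unfold Spec_query_expand_long_first query_expand_long_first query_expand_long_first_alt
  have hexp : (PySem.List.pyRange 0 ((tokens.length : Int) - 1) 1).foldl
      (fun acc i =>
        let bigram := PySem.List.pyGetD tokens i "" ++ PySem.List.pyGetD tokens (i + 1) ""
        if 3 ≤ PySem.Str.len bigram then acc ++ [bigram] else acc) tokens
      = tokens ++ (tokens.zip tokens.tail).filterMap
          (fun p => if 3 ≤ PySem.Str.len (p.1 ++ p.2) then some (p.1 ++ p.2) else none) := by
    show (PySem.List.pyRange 0 ((tokens.length : Int) - 1) 1).foldl
        (fun acc i =>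
          if 3 ≤ PySem.Str.len (PySem.List.pyGetD tokens i "" ++ PySem.List.pyGetD tokens (i + 1) "")
          then acc ++ [PySem.List.pyGetD tokens i "" ++ PySem.List.pyGetD tokens (i + 1) ""] else acc)
        tokens = _
    rw [pv_foldl_append_ite_filterMap
        (fun i : Int => 3 ≤ PySem.Str.len (PySem.List.pyGetD tokens i "" ++ PySem.List.pyGetD tokens (i + 1) ""))
        (fun i : Int => PySem.List.pyGetD tokens i "" ++ PySem.List.pyGetD tokens (i + 1) "")]
    rw [← pv_pairs_eq tokens, List.filterMap_map]
    rfl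
  simp only [hexp]
  exact pv_sorted_eq_buckets PySem.Str.len _
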